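-- pv_equiv track=rewrite | github.com/bhernandez-27/CUNYzero | logic_engine.py | process_review
-- ===== SOURCE A (Python) =====
-- def process_review(text, taboo_list):
--     words = text.split()
--     found_taboo = [w for w in words if w.lower() in [t.lower() for t in taboo_list]]
--
--     if len(found_taboo) >= 3:
--         return None, 2
--     elif 1 <= len(found_taboo) <= 2:
--         masked_text = " ".join(["*" if w.lower() in [t.lower() for t in taboo_list] else w for w in words])
--         return masked_text, 1
--     return text, 0
-- ===== SOURCE B (Python) =====
-- def process_review(text, taboo_list):
--     taboo = {t.lower() for t in taboo_list}
--     masked = []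
--     hits = 0
--     for w in text.split():
--         if w.lower() in taboo:
--             hits += 1
--             if hits == 3:
--                 return None, 2
--             masked.append("*")
--         else:
--             masked.append(w)
--     if hits:
--         return " ".join(masked), 1
--     return text, 0
-- ===== Notes on version B (the rewrite author's own statement) =====
-- stated objective: alternative
-- what changed: B is a single online pass with an accumulator: it lowers the taboo list into a set once, then walks the words once, simultaneously building the masked word list and counting hits, aborting with (None, 2) the moment a third taboo word is seen, with one final branch on the hit count; A runs staged passes (count pass, then a separate masking pass) that each rebuild and rescan the lowered taboo list per word.
import Mathlib
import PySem

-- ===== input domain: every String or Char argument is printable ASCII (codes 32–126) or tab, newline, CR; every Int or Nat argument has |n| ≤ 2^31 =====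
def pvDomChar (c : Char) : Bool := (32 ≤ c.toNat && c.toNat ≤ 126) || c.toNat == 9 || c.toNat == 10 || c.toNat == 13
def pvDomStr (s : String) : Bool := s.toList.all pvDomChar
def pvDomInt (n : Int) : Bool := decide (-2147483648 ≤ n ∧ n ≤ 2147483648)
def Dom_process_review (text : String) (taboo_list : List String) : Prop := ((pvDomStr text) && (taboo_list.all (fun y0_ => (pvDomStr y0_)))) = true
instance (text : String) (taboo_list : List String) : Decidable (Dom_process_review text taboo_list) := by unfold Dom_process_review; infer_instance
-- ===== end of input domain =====

-- B replaces A's staged passes (count, then re-mask, each rescanning the re-lowered taboo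
-- list per word) by one online pass with an accumulator that masks and counts together and
-- aborts at the third hit; alternative decomposition, same result.

-- ===== PORT A =====
def process_review (text : String) (taboo_list : List String) : Option String × Int :=
  let words := PySem.Str.split₀ text
  let found_taboo := words.filter
    (fun w => (taboo_list.map PySem.Str.lower).contains (PySem.Str.lower w))
  if found_taboo.length ≥ 3 then (none, 2)
  else if 1 ≤ found_taboo.length ∧ found_taboo.length ≤ 2 then
    (some (PySem.Str.join " " (words.map
      (fun w => if (taboo_list.map PySem.Str.lower).contains (PySem.Str.lower w) then "*" else w))), 1)
  else (some text, 0)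

-- ===== PORT B =====
-- the for-loop of Source B: walks the words once, extending `masked` and `hits`;
-- returns none when the early `return None, 2` fires at the third hit
def prLoop (taboo : PySem.Set String) (ws : List String)
    (masked : List String) (hits : Nat) : Option (List String × Nat) :=
  match ws with
  | [] => some (masked, hits)
  | w :: rest =>
    if PySem.Set.contains taboo (PySem.Str.lower w) then
      if hits + 1 == 3 then none
      else prLoop taboo rest (masked ++ ["*"]) (hits + 1)
    else prLoop taboo rest (masked ++ [w]) hits

def process_review_alt (text : String) (taboo_list : List String) : Option String × Int :=
  let taboo : PySem.Set String := PySem.Set.ofList (taboo_list.map PySem.Str.lower)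
  match prLoop taboo (PySem.Str.split₀ text) [] 0 with
  | none => (none, 2)
  | some (masked, hits) =>
    if hits ≠ 0 then (some (PySem.Str.join " " masked), 1)
    else (some text, 0)

-- ===== PRECONDITION & SPEC =====
def Spec_process_review (text : String) (taboo_list : List String) (out : Option String × Int) : Prop := out = process_review_alt text taboo_list
instance (text : String) (taboo_list : List String) (out : Option String × Int) : Decidable (Spec_process_review text taboo_list out) := by unfold Spec_process_review; infer_instance

-- ===== CLAIM (what is proved, stated in full; the proofs are below) =====
def Claim_equal_process_review : Prop := ∀ (text : String) (taboo_list : List String), Dom_process_review text taboo_list → Spec_process_review text taboo_list (process_review text taboo_list)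

-- ===== LEMMAS AND PROOFS =====

theorem pv_set_contains_ofList (xs : List String) (x : String) :
    PySem.Set.contains (PySem.Set.ofList xs) x = xs.contains x := by
  simp [PySem.Set.mem_ofList]

-- loop characterisation: with at most 2 hits so far, the loop aborts iff the
-- remaining matches push the total to 3, else returns the masked words and total
theorem pv_prLoop_char (taboo : PySem.Set String) (ws : List String) :
    ∀ (masked : List String) (hits : Nat), hits ≤ 2 →
    prLoop taboo ws masked hits =
      (if hits + (ws.filter (fun w => PySem.Set.contains taboo (PySem.Str.lower w))).length ≥ 3
       then none
       else some (masked ++ ws.map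
          (fun w => if PySem.Set.contains taboo (PySem.Str.lower w) then "*" else w),
          hits + (ws.filter (fun w => PySem.Set.contains taboo (PySem.Str.lower w))).length)) := by
  induction ws with
  | nil =>
    intro masked hits h
    simp only [prLoop, List.filter_nil, List.length_nil, List.map_nil, List.append_nil,
      Nat.add_zero]
    rw [if_neg (by omega)]
  | cons w rest ih =>
    intro masked hits h
    simp only [prLoop, List.filter_cons, List.map_cons, beq_iff_eq]
    by_cases hw : PySem.Set.contains taboo (PySem.Str.lower w) = true
    · simp only [hw, if_true, List.length_cons]
      by_cases h3 : hits + 1 = 3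
      · rw [if_pos h3, if_pos (by omega)]
      · rw [if_neg h3, ih _ _ (by omega)]
        have e1 : hits + 1 + (rest.filter
            (fun w => PySem.Set.contains taboo (PySem.Str.lower w))).length
            = hits + ((rest.filter
            (fun w => PySem.Set.contains taboo (PySem.Str.lower w))).length + 1) := by omega
        rw [e1]
        split_ifs with hc
        · rfl
        · simp [List.append_assoc]
    · rw [if_neg hw, if_neg hw, ih _ _ h]
      split_ifs with hc
      · rfl
      · simp [List.append_assoc]

-- ===== VERDICT (by name: the statement is the Claim_ definition above) =====
theorem process_review_spec : Claim_equal_process_review := by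
  intro text taboo_list _
  unfold Spec_process_review process_review process_review_alt
  simp only [pv_prLoop_char _ _ [] 0 (by norm_num : (0:Nat) ≤ 2),pv_set_contains_ofList, Nat.zero_add, List.nil_append]
  set L := (List.filter (fun w => (List.map PySem.Str.lower taboo_list).contains (PySem.Str.lower w))
      (PySem.Str.split₀ text)).length with hL
  split_ifs with h1 h2
  · rfl
  · simp only []
    rw [if_pos (show L ≠ 0 by omega)]
  · simp only []
    rw [if_neg (show ¬ L ≠ 0 by omega)]
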